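-- pv_equiv track=rewrite | github.com/mirandasong24/cs3245-hw4 | search.py | find_title_and_content_docIDs_for_three_way_merge
-- ===== SOURCE A (Python) =====
-- def merge_two_positional_lists(lst1, lst2):
--     result = []
--     for item1 in lst1:
--         for item2 in lst2:
--             if item2 == item1 + 1:      # If the positional index in lst2 is exactly one after a positional index
--                 result.append(item2)    # in lst1, then add the second positional index to the result list
--     return result
--
-- def find_title_and_content_docIDs_for_three_way_merge(lst1, lst2, lst3):
--     common_title_docIDs = []
--     common_content_docIDs = []
--     filtered_lists = filter_three_lists_by_common_docIDs(lst1, lst2, lst3)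
--     modified_lst1 = filtered_lists[0]
--     modified_lst2 = filtered_lists[1]
--     modified_lst3 = filtered_lists[2]
--     for item1, item2, item3 in zip(modified_lst1, modified_lst2, modified_lst3):
--         merged_title_lst = []
--         merged_content_lst = []
--
--         if item1[2] != None and item2[2] != None and item3[2] != None:
--             merged_title_lst = merge_three_positional_lists(item1[2], item2[2], item3[2])
--         if item1[3] != None and item2[3] != None and item3[3] != None:
--             merged_content_lst = merge_three_positional_lists(item1[3], item2[3], item3[3])
--
--         if merged_title_lst != []:
--             common_title_docIDs.append(item1[0])
--         if merged_content_lst != []: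
--             common_content_docIDs.append(item1[0])
--
--     return [common_title_docIDs, common_content_docIDs]
--
-- def filter_three_lists_by_common_docIDs(lst1, lst2, lst3):
--     modified_lst1 = []
--     modified_lst2 = []
--     modified_lst3 = []
--     for item1 in lst1:
--         for item2 in lst2:
--             for item3 in lst3:
--                 if item1[0] == item2[0] and item2[0] == item3[0]:  # Assuming docID is type int
--                     modified_lst1.append(item1)
--                     modified_lst2.append(item2)
--                     modified_lst3.append(item3)
--     return [modified_lst1, modified_lst2, modified_lst3]
--
-- def merge_three_positional_lists(lst1, lst2, lst3):
--     result1 = merge_two_positional_lists(lst1, lst2)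
--     result2 = merge_two_positional_lists(result1, lst3)
--     return result2
-- ===== SOURCE B (Python) =====
-- def _has_adjacent_triple(p1, p2, p3):
--     # True iff merging the three positional lists would yield a non-empty result:
--     # some position r in p3 has r-1 in p2 and r-2 in p1.
--     if p1 is None or p2 is None or p3 is None:
--         return False
--     s1 = set(p1)
--     s2 = set(p2)
--     return any(r - 1 in s2 and r - 2 in s1 for r in p3)
--
-- def find_title_and_content_docIDs_for_three_way_merge(lst1, lst2, lst3):
--     by2 = {}
--     for item in lst2:
--         by2.setdefault(item[0], []).append(item)
--     by3 = {}
--     for item in lst3: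
--         by3.setdefault(item[0], []).append(item)
--     common_title_docIDs = []
--     common_content_docIDs = []
--     for item1 in lst1:
--         for item2 in by2.get(item1[0], []):
--             for item3 in by3.get(item1[0], []):
--                 if _has_adjacent_triple(item1[2], item2[2], item3[2]):
--                     common_title_docIDs.append(item1[0])
--                 if _has_adjacent_triple(item1[3], item2[3], item3[3]):
--                     common_content_docIDs.append(item1[0])
--     return [common_title_docIDs, common_content_docIDs]
-- ===== Notes on version B (the rewrite author's own statement) =====
-- stated objective: faster
-- what changed: B replaces A's triple nested-loop docID intersection plus build-the-merged-lists-and-test-emptiness with a one-pass hash grouping of lst2/lst3 by docID and a set-membership adjacency test (any r in p3 with r-1 in set(p2) and r-2 in set(p1)).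
import Mathlib
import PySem

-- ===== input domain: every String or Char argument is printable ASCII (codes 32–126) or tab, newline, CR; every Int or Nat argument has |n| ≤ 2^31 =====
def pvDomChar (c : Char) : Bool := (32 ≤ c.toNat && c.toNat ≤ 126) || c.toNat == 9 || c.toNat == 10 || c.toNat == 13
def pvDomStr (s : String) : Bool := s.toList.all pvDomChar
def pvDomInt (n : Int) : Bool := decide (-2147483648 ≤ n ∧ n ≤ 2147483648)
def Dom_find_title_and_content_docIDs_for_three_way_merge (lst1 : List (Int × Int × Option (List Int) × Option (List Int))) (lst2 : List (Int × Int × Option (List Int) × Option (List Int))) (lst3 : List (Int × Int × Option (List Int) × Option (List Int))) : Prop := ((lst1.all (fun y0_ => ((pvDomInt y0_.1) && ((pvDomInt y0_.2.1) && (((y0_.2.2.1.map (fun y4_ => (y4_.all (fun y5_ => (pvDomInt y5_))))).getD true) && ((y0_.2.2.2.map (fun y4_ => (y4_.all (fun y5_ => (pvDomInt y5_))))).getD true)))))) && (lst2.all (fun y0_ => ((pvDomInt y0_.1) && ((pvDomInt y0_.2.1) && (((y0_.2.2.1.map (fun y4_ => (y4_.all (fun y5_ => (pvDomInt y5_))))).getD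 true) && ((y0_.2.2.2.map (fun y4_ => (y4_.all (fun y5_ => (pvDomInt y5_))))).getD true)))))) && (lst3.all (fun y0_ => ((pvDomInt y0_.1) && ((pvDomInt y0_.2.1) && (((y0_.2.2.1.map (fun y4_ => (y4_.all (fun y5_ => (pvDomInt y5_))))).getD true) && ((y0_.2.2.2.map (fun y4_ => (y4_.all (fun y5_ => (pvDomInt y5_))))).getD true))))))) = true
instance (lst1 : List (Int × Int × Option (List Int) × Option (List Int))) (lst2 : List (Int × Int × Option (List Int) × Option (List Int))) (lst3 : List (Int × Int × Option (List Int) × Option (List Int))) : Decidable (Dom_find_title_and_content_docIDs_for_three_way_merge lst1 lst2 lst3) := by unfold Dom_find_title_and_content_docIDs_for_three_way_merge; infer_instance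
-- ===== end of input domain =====

-- B replaces A's cubic docID intersection and nested-loop positional merges by a hash-grouping
-- of lst2/lst3 by docID plus a set-membership adjacency test (objective: faster).

abbrev PItem := Int × Int × Option (List Int) × Option (List Int)

-- ===== PORT A =====
def merge_two_positional_lists (lst1 lst2 : List Int) : List Int :=
  lst1.foldl (fun result item1 =>
    lst2.foldl (fun result item2 =>
      if item2 == item1 + 1 then result ++ [item2] else result) result) []

def merge_three_positional_lists (lst1 lst2 lst3 : List Int) : List Int :=
  let result1 := merge_two_positional_lists lst1 lst2
  let result2 := merge_two_positional_lists result1 lst3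
  result2

-- 'if x != None and y != None and z != None then merge_three(...) else []' factored as a helper
def merge_opt_three (o1 o2 o3 : Option (List Int)) : List Int :=
  match o1, o2, o3 with
  | some a, some b, some c => merge_three_positional_lists a b c
  | _, _, _ => []

def filter_three_lists_by_common_docIDs (lst1 lst2 lst3 : List PItem) :
    List PItem × List PItem × List PItem :=
  lst1.foldl (fun m item1 =>
    lst2.foldl (fun m item2 =>
      lst3.foldl (fun m item3 =>
        if item1.1 == item2.1 && item2.1 == item3.1 then
          (m.1 ++ [item1], m.2.1 ++ [item2], m.2.2 ++ [item3])
        else m) m) m) ([], [], [])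

def find_title_and_content_docIDs_for_three_way_merge (lst1 : List (Int × Int × Option (List Int) × Option (List Int))) (lst2 : List (Int × Int × Option (List Int) × Option (List Int))) (lst3 : List (Int × Int × Option (List Int) × Option (List Int))) : List (List Int) :=
  let filtered := filter_three_lists_by_common_docIDs lst1 lst2 lst3
  let modified_lst1 := filtered.1
  let modified_lst2 := filtered.2.1
  let modified_lst3 := filtered.2.2
  let acc := (modified_lst1.zip (modified_lst2.zip modified_lst3)).foldl
    (fun (acc : List Int × List Int) t =>
      let item1 := t.1
      let item2 := t.2.1
      let item3 := t.2.2
      let merged_title_lst := merge_opt_three item1.2.2.1 item2.2.2.1 item3.2.2.1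
      let merged_content_lst := merge_opt_three item1.2.2.2 item2.2.2.2 item3.2.2.2
      (if merged_title_lst ≠ [] then acc.1 ++ [item1.1] else acc.1,
       if merged_content_lst ≠ [] then acc.2 ++ [item1.1] else acc.2))
    ([], [])
  [acc.1, acc.2]

-- ===== PORT B =====
def has_adjacent_triple (p1 p2 p3 : Option (List Int)) : Bool :=
  match p1, p2, p3 with
  | some l1, some l2, some l3 =>
    let s1 := PySem.Set.ofList l1
    let s2 := PySem.Set.ofList l2
    l3.any (fun r => PySem.Set.contains s2 (r - 1) && PySem.Set.contains s1 (r - 2))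
  | _, _, _ => false

def group_by_docID (lst : List PItem) : PySem.Dict Int (List PItem) :=
  lst.foldl (fun d item => d.modify item.1 [] (fun v => v ++ [item])) PySem.Dict.empty

def find_title_and_content_docIDs_for_three_way_merge_alt (lst1 : List (Int × Int × Option (List Int) × Option (List Int))) (lst2 : List (Int × Int × Option (List Int) × Option (List Int))) (lst3 : List (Int × Int × Option (List Int) × Option (List Int))) : List (List Int) :=
  let by2 := group_by_docID lst2
  let by3 := group_by_docID lst3
  let acc := lst1.foldl (fun (acc : List Int × List Int) item1 =>
      (by2.getD item1.1 []).foldl (fun acc item2 =>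
        (by3.getD item1.1 []).foldl (fun acc item3 =>
          (if has_adjacent_triple item1.2.2.1 item2.2.2.1 item3.2.2.1
             then acc.1 ++ [item1.1] else acc.1,
           if has_adjacent_triple item1.2.2.2 item2.2.2.2 item3.2.2.2
             then acc.2 ++ [item1.1] else acc.2)) acc) acc)
    ([], [])
  [acc.1, acc.2]

-- ===== PRECONDITION & SPEC =====
def Spec_find_title_and_content_docIDs_for_three_way_merge (lst1 : List (Int × Int × Option (List Int) × Option (List Int))) (lst2 : List (Int × Int × Option (List Int) × Option (List Int))) (lst3 : List (Int × Int × Option (List Int) × Option (List Int))) (out : List (List Int)) : Prop := out = find_title_and_content_docIDs_for_three_way_merge_alt lst1 lst2 lst3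
instance (lst1 : List (Int × Int × Option (List Int) × Option (List Int))) (lst2 : List (Int × Int × Option (List Int) × Option (List Int))) (lst3 : List (Int × Int × Option (List Int) × Option (List Int))) (out : List (List Int)) : Decidable (Spec_find_title_and_content_docIDs_for_three_way_merge lst1 lst2 lst3 out) := by unfold Spec_find_title_and_content_docIDs_for_three_way_merge; infer_instance

-- ===== CLAIM (what is proved, stated in full; the proofs are below) =====
def Claim_equal_find_title_and_content_docIDs_for_three_way_merge : Prop := ∀ (lst1 : List (Int × Int × Option (List Int) × Option (List Int))) (lst2 : List (Int × Int × Option (List Int) × Option (List Int))) (lst3 : List (Int × Int × Option (List Int) × Option (List Int))), Dom_find_title_and_content_docIDs_for_three_way_merge lst1 lst2 lst3 → Spec_find_title_and_content_docIDs_for_three_way_merge lst1 lst2 lst3 (find_title_and_content_docIDs_for_three_way_merge lst1 lst2 lst3)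

-- ===== LEMMAS AND PROOFS =====

-- proof-only helpers: the common list of docID-matching triples, and the common step
def pvStep (acc : List Int × List Int) (t : PItem × PItem × PItem) : List Int × List Int :=
  (if has_adjacent_triple t.1.2.2.1 t.2.1.2.2.1 t.2.2.2.2.1 then acc.1 ++ [t.1.1] else acc.1,
   if has_adjacent_triple t.1.2.2.2 t.2.1.2.2.2 t.2.2.2.2.2 then acc.2 ++ [t.1.1] else acc.2)

def pvTriples (lst1 lst2 lst3 : List PItem) : List (PItem × PItem × PItem) :=
  lst1.flatMap (fun i1 => lst2.flatMap (fun i2 =>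
    (lst3.filter (fun i3 => i1.1 == i2.1 && i2.1 == i3.1)).map (fun i3 => (i1, i2, i3))))

def pvTriples' (lst1 lst2 lst3 : List PItem) : List (PItem × PItem × PItem) :=
  lst1.flatMap (fun i1 => (lst2.filter (fun i2 => i2.1 == i1.1)).flatMap (fun i2 =>
    (lst3.filter (fun i3 => i3.1 == i1.1)).map (fun i3 => (i1, i2, i3))))

lemma merge_two_eq_flatMap (l1 l2 : List Int) :
    merge_two_positional_lists l1 l2
      = l1.flatMap (fun q => l2.filter (fun p => p == q + 1)) := by
  unfold merge_two_positional_lists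
  simp only [PySem.List.foldl_append_if_eq_filter, PySem.List.foldl_append_eq_flatMap,
    List.nil_append]

lemma mem_merge_two (l1 l2 : List Int) (x : Int) :
    x ∈ merge_two_positional_lists l1 l2 ↔ x ∈ l2 ∧ (x - 1) ∈ l1 := by
  rw [merge_two_eq_flatMap]
  simp only [List.mem_flatMap, List.mem_filter, beq_iff_eq]
  constructor
  · rintro ⟨q, hq, hx, rfl⟩
    exact ⟨hx, by simpa using hq⟩
  · rintro ⟨hx, h1⟩
    exact ⟨x - 1, h1, hx, by omega⟩

lemma merge_opt_ne_nil_iff (o1 o2 o3 : Option (List Int)) :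
    merge_opt_three o1 o2 o3 ≠ [] ↔ has_adjacent_triple o1 o2 o3 = true := by
  match o1, o2, o3 with
  | none, _, _ => simp [merge_opt_three, has_adjacent_triple]
  | some _, none, _ => simp [merge_opt_three, has_adjacent_triple]
  | some _, some _, none => simp [merge_opt_three, has_adjacent_triple]
  | some a, some b, some c =>
    show merge_three_positional_lists a b c ≠ [] ↔ _
    unfold merge_three_positional_lists has_adjacent_triple
    rw [Ne, List.eq_nil_iff_forall_not_mem]
    push Not
    simp only [List.any_eq_true, mem_merge_two, PySem.Set.contains, PySem.Set.mem_ofList,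
      Bool.and_eq_true, List.contains_iff_mem]
    constructor
    · rintro ⟨x, hc, hb, ha⟩
      refine ⟨x, hc, hb, ?_⟩
      have h : x - 1 - 1 = x - 2 := by ring
      rwa [h] at ha
    · rintro ⟨r, hc, hb, ha⟩
      refine ⟨r, hc, hb, ?_⟩
      have h : r - 1 - 1 = r - 2 := by ring
      rwa [h]

lemma getD_group_general (l : List PItem) (d : PySem.Dict Int (List PItem)) (k : Int) :
    (l.foldl (fun d it => d.modify it.1 [] (fun v => v ++ [it])) d).getD k []
      = d.getD k [] ++ l.filter (fun it => it.1 == k) := by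
  induction l generalizing d with
  | nil => simp
  | cons x xs ih =>
    rw [List.foldl_cons, ih, List.filter_cons, PySem.Dict.getD_modify]
    by_cases h : x.1 = k
    · simp [h]
    · simp [h, Ne.symm h]

lemma getD_group_by_docID (lst : List PItem) (k : Int) :
    (group_by_docID lst).getD k [] = lst.filter (fun it => it.1 == k) := by
  unfold group_by_docID
  simpa using getD_group_general lst PySem.Dict.empty k

lemma pv_zip_proj {α β γ : Type} (T : List (α × β × γ)) :
    (T.map (·.1)).zip ((T.map (·.2.1)).zip (T.map (·.2.2))) = T := by
  induction T with
  | nil => rfl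
  | cons t ts ih => simp [ih]

lemma pv_foldl_filter_triple {α β : Type} (p : α → Bool) (a b : β) (l : List α)
    (m : List β × List β × List α) :
    l.foldl (fun m i => if p i then (m.1 ++ [a], m.2.1 ++ [b], m.2.2 ++ [i]) else m) m
      = (m.1 ++ (l.filter p).map (fun _ => a), m.2.1 ++ (l.filter p).map (fun _ => b),
         m.2.2 ++ l.filter p) := by
  induction l generalizing m with
  | nil => simp
  | cons x xs ih =>
    rw [List.foldl_cons, List.filter_cons]
    by_cases h : p x
    · simp [h, ih]
    · simp [h, ih]

lemma pv_foldl_append3 {α β1 β2 β3 : Type} (f1 : α → List β1) (f2 : α → List β2)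
    (f3 : α → List β3) (l : List α) (m : List β1 × List β2 × List β3) :
    l.foldl (fun m x => (m.1 ++ f1 x, m.2.1 ++ f2 x, m.2.2 ++ f3 x)) m
      = (m.1 ++ l.flatMap f1, m.2.1 ++ l.flatMap f2, m.2.2 ++ l.flatMap f3) := by
  induction l generalizing m with
  | nil => simp
  | cons x xs ih => simp [ih]

lemma filter_three_eq (lst1 lst2 lst3 : List PItem) :
    filter_three_lists_by_common_docIDs lst1 lst2 lst3
      = ((pvTriples lst1 lst2 lst3).map (·.1),
         (pvTriples lst1 lst2 lst3).map (·.2.1),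
         (pvTriples lst1 lst2 lst3).map (·.2.2)) := by
  unfold filter_three_lists_by_common_docIDs
  simp only [pv_foldl_filter_triple, pv_foldl_append3]
  simp only [pvTriples, List.map_flatMap, List.map_map, List.nil_append,
    Function.comp_def, List.map_id']

lemma pv_foldl_flatMap {α β γ : Type} (l : List α) (g : α → List β) (f : γ → β → γ)
    (init : γ) :
    (l.flatMap g).foldl f init = l.foldl (fun acc x => (g x).foldl f acc) init := by
  induction l generalizing init with
  | nil => rfl
  | cons x xs ih => simp [List.flatMap_cons, List.foldl_append, ih]

lemma pv_flatMap_congr_mem {α β : Type} (l : List α) (f g : α → List β)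
    (h : ∀ x ∈ l, f x = g x) : l.flatMap f = l.flatMap g := by
  induction l with
  | nil => rfl
  | cons x xs ih =>
    simp only [List.flatMap_cons]
    rw [h x (List.mem_cons_self ..), ih (fun y hy => h y (List.mem_cons_of_mem _ hy))]

lemma pv_flatMap_filter {α β : Type} (l : List α) (p : α → Bool) (g : α → List β) :
    (l.filter p).flatMap g = l.flatMap (fun x => if p x then g x else []) := by
  induction l with
  | nil => rfl
  | cons x xs ih =>
    rw [List.filter_cons]
    by_cases h : p x
    · simp [h, ih]
    · simp [h, ih]

lemma pv_triples_eq (lst1 lst2 lst3 : List PItem) :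
    pvTriples lst1 lst2 lst3 = pvTriples' lst1 lst2 lst3 := by
  unfold pvTriples pvTriples'
  refine pv_flatMap_congr_mem _ _ _ (fun i1 _ => ?_)
  rw [pv_flatMap_filter]
  refine pv_flatMap_congr_mem _ _ _ (fun i2 _ => ?_)
  by_cases h : i2.1 = i1.1
  · have hb : (i2.1 == i1.1) = true := by simpa using h
    rw [if_pos hb]
    congr 1
    apply List.filter_congr
    intro i3 _
    simp [h, eq_comm]
  · have hb : (i2.1 == i1.1) = false := by simpa using h
    rw [if_neg (by simp [hb])]
    have hb2 : (i1.1 == i2.1) = false := by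
      simpa using fun hh : i1.1 = i2.1 => h hh.symm
    have : (fun i3 : PItem => i1.1 == i2.1 && i2.1 == i3.1) = fun _ => false := by
      funext i3
      rw [hb2, Bool.false_and]
    rw [this]
    simp

lemma A_eq_foldl (lst1 lst2 lst3 : List PItem) :
    find_title_and_content_docIDs_for_three_way_merge lst1 lst2 lst3
      = [((pvTriples lst1 lst2 lst3).foldl pvStep ([], [])).1,
         ((pvTriples lst1 lst2 lst3).foldl pvStep ([], [])).2] := by
  unfold find_title_and_content_docIDs_for_three_way_merge
  rw [filter_three_eq]
  dsimp only
  rw [pv_zip_proj]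
  simp only [merge_opt_ne_nil_iff]
  rfl

lemma B_eq_foldl (lst1 lst2 lst3 : List PItem) :
    find_title_and_content_docIDs_for_three_way_merge_alt lst1 lst2 lst3
      = [((pvTriples' lst1 lst2 lst3).foldl pvStep ([], [])).1,
         ((pvTriples' lst1 lst2 lst3).foldl pvStep ([], [])).2] := by
  unfold find_title_and_content_docIDs_for_three_way_merge_alt pvTriples'
  simp only [getD_group_by_docID, pv_foldl_flatMap, List.foldl_map]
  rfl

-- ===== VERDICT (by name: the statement is the Claim_ definition above) =====
theorem find_title_and_content_docIDs_for_three_way_merge_spec : Claim_equal_find_title_and_content_docIDs_for_three_way_merge := by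
  intro lst1 lst2 lst3 _
  unfold Spec_find_title_and_content_docIDs_for_three_way_merge
  rw [A_eq_foldl, B_eq_foldl, pv_triples_eq]
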